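-- pv_equiv track=rewrite | github.com/AlexMorman/ncrna_generation | GNN_Model/src/evaluation.py | enumerate_consensus_windows
-- ===== SOURCE A (Python) =====
-- from typing import Dict, List, Set, Tuple
--
-- def enumerate_consensus_windows(
--     consensus_structure: str,
--     min_len: int,
--     max_len: int,
-- ) -> List[Tuple[int, int, str]]:
--     """Enumerate all valid sliding windows over a consensus structure.
--
--     Each window's bracket notation is re-balanced: if a bracket's partner
--     lies outside the window, the bracket is converted to ``'.'``.  This
--     prevents feeding an unbalanced dot-bracket to :func:`structure_to_data`.
--
--     Args:
--         consensus_structure: Dot-bracket string.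
--         min_len:             Minimum window length (inclusive).
--         max_len:             Maximum window length (inclusive).
--
--     Returns:
--         List of ``(start, length, window_structure)`` triples for all
--         windows where ``min_len ≤ length ≤ max_len`` and
--         ``start + length ≤ len(consensus_structure)``.
--
--     Raises:
--         ValueError: If ``len(consensus_structure) < min_len``.
--     """
--     n = len(consensus_structure)
--     if n < min_len:
--         raise ValueError(
--             f"Consensus length ({n}) is shorter than min_len ({min_len})."
--         )
--
--     # Build full pair map for the consensus structure (standard '(' / ')')
--     full_pair: dict[int, int] = {}
--     stack: list[int] = []
--     for i, ch in enumerate(consensus_structure):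
--         if ch == "(":
--             stack.append(i)
--         elif ch == ")":
--             if stack:
--                 j = stack.pop()
--                 full_pair[j] = i
--                 full_pair[i] = j
--
--     windows: List[Tuple[int, int, str]] = []
--     for start in range(n):
--         for length in range(min_len, max_len + 1):
--             end = start + length
--             if end > n:
--                 break
--             # Re-balance: brackets whose partner is outside [start, end)
--             window_chars: list[str] = []
--             for i in range(start, end):
--                 ch = consensus_structure[i]
--                 if ch in "()" and i in full_pair:
--                     partner = full_pair[i]
--                     if not (start <= partner < end):
--                         ch = "."
--                 window_chars.append(ch)
--             windows.append((start, length, "".join(window_chars)))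
--
--     return windows
-- ===== SOURCE B (Python) =====
-- from typing import List, Tuple
--
-- def enumerate_consensus_windows(
--     consensus_structure: str,
--     min_len: int,
--     max_len: int,
-- ) -> List[Tuple[int, int, str]]:
--     """Incremental variant: for each start a single buffer is grown one
--     character at a time; a bracket whose partner is not yet inside the window
--     is written as '.' and the slot is restored in place once the partner
--     arrives, so no window is re-balanced from scratch."""
--     n = len(consensus_structure)
--     if n < min_len:
--         raise ValueError(
--             f"Consensus length ({n}) is shorter than min_len ({min_len})."
--         )
--
--     full_pair: dict = {}
--     stack: list = []
--     for i, ch in enumerate(consensus_structure):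
--         if ch == "(":
--             stack.append(i)
--         elif ch == ")":
--             if stack:
--                 j = stack.pop()
--                 full_pair[j] = i
--                 full_pair[i] = j
--
--     windows: List[Tuple[int, int, str]] = []
--     for start in range(n):
--         buf: list = []
--         for length in range(min_len, min(max_len, n - start) + 1):
--             while len(buf) < length:
--                 i = start + len(buf)
--                 ch = consensus_structure[i]
--                 if ch in "()" and i in full_pair:
--                     p = full_pair[i]
--                     if start <= p < i:
--                         buf.append(ch)
--                         buf[p - start] = consensus_structure[p]
--                     else:
--                         buf.append(".")
--                 else:
--                     buf.append(ch)
--             windows.append((start, length, "".join(buf)))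
--     return windows
-- ===== Notes on version B (the rewrite author's own statement) =====
-- stated objective: alternative
-- what changed: Instead of re-scanning and re-balancing every (start,length) window from scratch, B keeps one buffer per start and grows it a character at a time, writing '.' for a bracket whose partner is not yet inside and restoring that slot in place when the partner's index is reached; Pre_ excludes only the inputs where A raises ValueError (len < min_len).
import Mathlib
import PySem

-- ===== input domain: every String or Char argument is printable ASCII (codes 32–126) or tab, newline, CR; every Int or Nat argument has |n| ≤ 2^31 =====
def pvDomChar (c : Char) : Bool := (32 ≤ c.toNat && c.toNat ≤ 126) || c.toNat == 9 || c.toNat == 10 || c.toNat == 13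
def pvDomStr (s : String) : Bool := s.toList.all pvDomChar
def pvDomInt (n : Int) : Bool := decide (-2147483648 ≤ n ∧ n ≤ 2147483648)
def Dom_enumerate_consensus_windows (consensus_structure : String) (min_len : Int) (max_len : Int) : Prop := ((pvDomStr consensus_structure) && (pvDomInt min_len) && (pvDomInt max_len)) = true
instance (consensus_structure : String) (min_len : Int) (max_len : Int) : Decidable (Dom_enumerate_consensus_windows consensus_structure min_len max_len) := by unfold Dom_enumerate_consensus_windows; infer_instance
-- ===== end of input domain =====

-- B replaces A's per-window from-scratch rebalancing by one incrementally grown buffer per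
-- start (restore-on-close, a different algorithm of similar cost); return values proved equal.


-- ===== PORT A =====
-- shared helper (identical in both Pythons): the `for i, ch in enumerate(...)` loop building
-- full_pair; the stack is kept head-first (Python appends and pops at the same end).
def pvPairStep (st : PySem.Dict Int Int × List Int) (p : Int × Char) : PySem.Dict Int Int × List Int :=
  if p.2 = '(' then (st.1, p.1 :: st.2)
  else if p.2 = ')' then
    match st.2 with
    | [] => st
    | j :: rest => ((st.1.insert j p.1).insert p.1 j, rest)
  else st

def pvFullPair (cs : List Char) : PySem.Dict Int Int :=
  ((PySem.List.enumerate cs 0).foldl pvPairStep (PySem.Dict.empty, [])).1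

-- one window character of A's inner re-balancing loop; the index i is always in range
-- (start ≤ i < start+length ≤ n), so pyGetD's default is never read.
def pvWCharA (cs : List Char) (fp : PySem.Dict Int Int) (start endd i : Int) : Char :=
  let ch := PySem.List.pyGetD cs i '?'
  if ch = '(' ∨ ch = ')' then
    match fp.get? i with
    | some partner => if ¬ (start ≤ partner ∧ partner < endd) then '.' else ch
    | none => ch
  else ch

-- A's `for length in range(min_len, max_len+1): ... if end > n: break` loop
def pvALenLoop (cs : List Char) (fp : PySem.Dict Int Int) (n start : Int) :
    List Int → List (Int × Int × String)
  | [] => []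
  | L :: rest =>
    if start + L > n then []
    else (start, L,
          String.ofList ((PySem.List.pyRange start (start + L) 1).map (pvWCharA cs fp start (start + L))))
         :: pvALenLoop cs fp n start rest

def enumerate_consensus_windows (consensus_structure : String) (min_len : Int) (max_len : Int) : List (Int × Int × String) :=
  let cs := consensus_structure.toList
  let n : Int := cs.length
  let fp := pvFullPair cs
  (PySem.List.pyRange 0 n 1).foldl
    (fun acc start => acc ++ pvALenLoop cs fp n start (PySem.List.pyRange min_len (max_len + 1) 1))
    []

-- ===== PORT B =====
-- one iteration of B's `while` body: append the next character (as '.' if its partner is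
-- outside the window so far) and restore the partner slot in place when a pair closes.
-- buf[p - start] has 0 ≤ p - start, so List.set at (p - start).toNat is Python's buf[p-start] = …
def pvBStep (cs : List Char) (fp : PySem.Dict Int Int) (start : Int) (buf : List Char) (i : Int) : List Char :=
  let ch := PySem.List.pyGetD cs i '?'
  if ch = '(' ∨ ch = ')' then
    match fp.get? i with
    | some p =>
      if start ≤ p ∧ p < i then (buf ++ [ch]).set (p - start).toNat (PySem.List.pyGetD cs p '?')
      else buf ++ ['.']
    | none => buf ++ [ch]
  else buf ++ [ch]

-- B's `while len(buf) < length` loop: grow the buffer one index at a time until it reaches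
-- the requested length (the index processed is always start + len(buf))
def pvBExtend (cs : List Char) (fp : PySem.Dict Int Int) (start : Int) (buf : List Char) (L : Int) : List Char :=
  (PySem.List.pyRange (start + (buf.length : Int)) (start + L) 1).foldl (pvBStep cs fp start) buf

-- B's body for one start: fold over the requested lengths, growing the buffer and
-- recording a join of it at each length
def pvBStartLoop (cs : List Char) (fp : PySem.Dict Int Int) (ml xl n start : Int) :
    List (Int × Int × String) :=
  ((PySem.List.pyRange ml (min xl (n - start) + 1) 1).foldl
     (fun (st : List Char × List (Int × Int × String)) L =>
        let buf := pvBExtend cs fp start st.1 L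
        (buf, st.2 ++ [(start, L, String.ofList buf)]))
     ([], [])).2

def enumerate_consensus_windows_alt (consensus_structure : String) (min_len : Int) (max_len : Int) : List (Int × Int × String) :=
  let cs := consensus_structure.toList
  let n : Int := cs.length
  let fp := pvFullPair cs
  (PySem.List.pyRange 0 n 1).foldl
    (fun acc start => acc ++ pvBStartLoop cs fp min_len max_len n start)
    []

-- ===== PRECONDITION & SPEC =====
-- A raises ValueError when len(consensus_structure) < min_len; exactly those inputs are excluded.
def Pre_enumerate_consensus_windows (consensus_structure : String) (min_len : Int) (max_len : Int) : Prop :=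
  min_len ≤ (consensus_structure.toList.length : Int)
instance (consensus_structure : String) (min_len : Int) (max_len : Int) : Decidable (Pre_enumerate_consensus_windows consensus_structure min_len max_len) := by unfold Pre_enumerate_consensus_windows; infer_instance

def pvWitness_enumerate_consensus_windows : String × Int × Int := ("(()).", 1, 3)

def Spec_enumerate_consensus_windows (consensus_structure : String) (min_len : Int) (max_len : Int) (out : List (Int × Int × String)) : Prop := out = enumerate_consensus_windows_alt consensus_structure min_len max_len
instance (consensus_structure : String) (min_len : Int) (max_len : Int) (out : List (Int × Int × String)) : Decidable (Spec_enumerate_consensus_windows consensus_structure min_len max_len out) := by unfold Spec_enumerate_consensus_windows; infer_instance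

-- ===== CLAIM (what is proved, stated in full; the proofs are below) =====
def Claim_equal_enumerate_consensus_windows : Prop := ∀ (consensus_structure : String) (min_len : Int) (max_len : Int), Dom_enumerate_consensus_windows consensus_structure min_len max_len → Pre_enumerate_consensus_windows consensus_structure min_len max_len → Spec_enumerate_consensus_windows consensus_structure min_len max_len (enumerate_consensus_windows consensus_structure min_len max_len)

-- ===== LEMMAS AND PROOFS =====

-- the properties of the pair map that make restore-on-close correct: it is symmetric,
-- irreflexive, and only keys at bracket positions occur.
def pvPairGood (cs : List Char) (fp : PySem.Dict Int Int) : Prop :=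
  ∀ a b, fp.get? a = some b →
    fp.get? b = some a ∧ a ≠ b ∧ (PySem.List.pyGetD cs a '?' = '(' ∨ PySem.List.pyGetD cs a '?' = ')')

-- invariant of the pair-building fold after the first k positions: the dict is symmetric,
-- irreflexive, keyed at bracket positions below k; the pending stack holds distinct '('
-- positions below k that are not yet keys
def pvPairInv (cs : List Char) (k : Int) (S : PySem.Dict Int Int × List Int) : Prop :=
  (∀ a b, S.1.get? a = some b → S.1.get? b = some a ∧ a ≠ b ∧
      (PySem.List.pyGetD cs a '?' = '(' ∨ PySem.List.pyGetD cs a '?' = ')') ∧ a < k ∧ b < k)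
  ∧ (∀ j ∈ S.2, j < k ∧ S.1.get? j = none ∧ PySem.List.pyGetD cs j '?' = '(')
  ∧ S.2.Pairwise (fun x y => y < x)

theorem pvPairStep_inv (cs : List Char) (k : Int) (S : PySem.Dict Int Int × List Int)
    (h : pvPairInv cs k S) :
    pvPairInv cs (k + 1) (pvPairStep S (k, PySem.List.pyGetD cs k '?')) := by
  obtain ⟨d, st⟩ := S
  obtain ⟨hd, hst, hpw⟩ := h
  have hknone : d.get? k = none := by
    cases hck : d.get? k with
    | none => rfl
    | some b => exact absurd (hd k b hck).2.2.2.1 (by omega)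
  by_cases h1 : PySem.List.pyGetD cs k '?' = '('
  · simp only [pvPairStep, h1, if_pos]
    refine ⟨fun a b hab => ?_, fun j hj => ?_, ?_⟩
    · obtain ⟨x1, x2, x3, x4, x5⟩ := hd a b hab
      exact ⟨x1, x2, x3, by omega, by omega⟩
    · rcases List.mem_cons.mp hj with rfl | hj'
      · exact ⟨by omega, hknone, h1⟩
      · obtain ⟨y1, y2, y3⟩ := hst j hj'
        exact ⟨by omega, y2, y3⟩
    · exact List.pairwise_cons.mpr ⟨fun j hj' => (hst j hj').1, hpw⟩
  · by_cases h2 : PySem.List.pyGetD cs k '?' = ')'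
    · cases st with
      | nil =>
        unfold pvPairStep
        dsimp only
        rw [if_neg h1, if_pos h2]
        refine ⟨fun a b hab => ?_, fun j hj => by simp at hj, List.Pairwise.nil⟩
        obtain ⟨x1, x2, x3, x4, x5⟩ := hd a b hab
        exact ⟨x1, x2, x3, by omega, by omega⟩
      | cons j rest =>
        obtain ⟨hjk, hjnone, hjbr⟩ := hst j List.mem_cons_self
        have hrest := fun j' hj' => hst j' (List.mem_cons_of_mem j hj')
        have hpw' := List.pairwise_cons.mp hpw
        simp only [pvPairStep, h2, Char.reduceEq, reduceIte]
        have hget : ∀ a, ((d.insert j k).insert k j).get? a =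
            if a = k then some j else if a = j then some k else d.get? a := by
          intro a
          by_cases hak : a = k
          · subst hak; rw [PySem.Dict.get?_insert_self, if_pos rfl]
          · rw [PySem.Dict.get?_insert_of_ne _ _ hak, if_neg hak]
            by_cases haj : a = j
            · subst haj; rw [PySem.Dict.get?_insert_self, if_pos rfl]
            · rw [PySem.Dict.get?_insert_of_ne _ _ haj, if_neg haj]
        refine ⟨fun a b hab => ?_, fun j' hj' => ?_, hpw'.2⟩
        · rw [hget a] at hab
          by_cases hak : a = k
          · rw [if_pos hak] at hab
            injection hab with hb
            subst hak; subst hb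
            exact ⟨by rw [hget j, if_neg (by omega), if_pos rfl], by omega, Or.inr h2, by omega, by omega⟩
          · rw [if_neg hak] at hab
            by_cases haj : a = j
            · rw [if_pos haj] at hab
              injection hab with hb
              subst haj; subst hb
              exact ⟨by rw [hget k, if_pos rfl], by omega, Or.inl hjbr, by omega, by omega⟩
            · rw [if_neg haj] at hab
              obtain ⟨x1, x2, x3, x4, x5⟩ := hd a b hab
              have hbj : b ≠ j := by
                intro hbj
                rw [hbj, show (d, j :: rest).1.get? j = d.get? j from rfl] at x1
                rw [hjnone] at x1
                exact absurd x1 (by simp)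
              exact ⟨by rw [hget b, if_neg (by omega), if_neg hbj]; exact x1, x2, x3, by omega, by omega⟩
        · obtain ⟨y1, y2, y3⟩ := hrest j' hj'
          have hj'j : j' < j := hpw'.1 j' hj'
          exact ⟨by omega, by rw [hget j', if_neg (by omega), if_neg (by omega)]; exact y2, y3⟩
    · unfold pvPairStep
      dsimp only
      rw [if_neg h1, if_neg h2]
      refine ⟨fun a b hab => ?_, fun j' hj' => ?_, hpw⟩
      · obtain ⟨x1, x2, x3, x4, x5⟩ := hd a b hab
        exact ⟨x1, x2, x3, by omega, by omega⟩
      · obtain ⟨y1, y2, y3⟩ := hst j' hj'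
        exact ⟨by omega, y2, y3⟩

theorem pvFullPair_inv (cs : List Char) (m : Nat) :
    pvPairInv cs (m : Int)
      (((PySem.List.pyRange 0 (m : Int) 1).map
          (fun j => (j, PySem.List.pyGetD cs j '?'))).foldl pvPairStep
        (PySem.Dict.empty, [])) := by
  induction m with
  | zero =>
    rw [PySem.List.pyRange_one_eq_nil (by omega)]
    refine ⟨fun a b hab => ?_, fun j hj => by simp at hj, List.Pairwise.nil⟩
    simp only [List.map_nil, List.foldl_nil] at hab
    rw [show (PySem.Dict.empty : PySem.Dict Int Int).get? a = none from rfl] at hab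
    simp at hab
  | succ m ih =>
    rw [show ((m + 1 : Nat) : Int) = (m : Int) + 1 from by push_cast; ring,
        PySem.List.pyRange_one_succ_right (by omega), List.map_append, List.foldl_append]
    exact pvPairStep_inv cs (m : Int) _ ih

theorem pvFullPair_good (cs : List Char) : pvPairGood cs (pvFullPair cs) := by
  have h := pvFullPair_inv cs cs.length
  have hfp : pvFullPair cs =
      (((PySem.List.pyRange 0 ((cs.length : Nat) : Int) 1).map
          (fun j => (j, PySem.List.pyGetD cs j '?'))).foldl pvPairStep
        (PySem.Dict.empty, [])).1 := by
    unfold pvFullPair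
    rw [PySem.List.enumerate_eq_map_pyRange cs '?']
    simp [PySem.List.len_eq]
  intro a b hab
  rw [hfp] at hab ⊢
  exact ⟨(h.1 a b hab).1, (h.1 a b hab).2.1, (h.1 a b hab).2.2.1⟩

-- the abstract window content A computes for window [start, start+len)
def pvWin (cs : List Char) (fp : PySem.Dict Int Int) (start endd : Int) : List Char :=
  (PySem.List.pyRange start endd 1).map (pvWCharA cs fp start endd)

theorem pvWin_len (cs : List Char) (fp : PySem.Dict Int Int) (start endd : Int) :
    (pvWin cs fp start endd).length = (endd - start).toNat := by
  simp [pvWin, PySem.List.length_pyRange_one]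

-- a window of non-positive requested length is empty
theorem pvWin_nil (cs : List Char) (fp : PySem.Dict Int Int) (start endd : Int)
    (h : endd ≤ start) : pvWin cs fp start endd = [] := by
  simp [pvWin, PySem.List.pyRange_one_eq_nil h]

-- the window character of a slot j < i does not change when the right end moves from i to
-- i+1, provided j's partner is not i itself
theorem pvWCharA_stable (cs : List Char) (fp : PySem.Dict Int Int) (start i j : Int)
    (_hji : j < i) (hnp : ∀ q, fp.get? j = some q → q ≠ i) :
    pvWCharA cs fp start (i + 1) j = pvWCharA cs fp start i j := by
  unfold pvWCharA
  cases hq : fp.get? j with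
  | none => simp
  | some q =>
    have hqi := hnp q hq
    have hiff : (¬ (start ≤ q ∧ q < i + 1)) ↔ (¬ (start ≤ q ∧ q < i)) := by omega
    simp only [hiff]

-- KEY STEP: extending the window by one index is exactly B's buffer update
theorem pvBStep_win (cs : List Char) (fp : PySem.Dict Int Int) (start i : Int)
    (hg : pvPairGood cs fp) (hsi : start ≤ i) :
    pvBStep cs fp start (pvWin cs fp start i) i = pvWin cs fp start (i + 1) := by
  have hsplit : pvWin cs fp start (i + 1) =
      (PySem.List.pyRange start i 1).map (pvWCharA cs fp start (i + 1)) ++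
        [pvWCharA cs fp start (i + 1) i] := by
    unfold pvWin
    rw [PySem.List.pyRange_one_succ_right hsi, List.map_append]
    rfl
  -- when no slot's partner is i, only the appended character is new
  have hstable : (∀ j q, start ≤ j → j < i → fp.get? j = some q → q ≠ i) →
      (PySem.List.pyRange start i 1).map (pvWCharA cs fp start (i + 1)) =
        pvWin cs fp start i := by
    intro h
    apply List.map_congr_left
    intro j hj
    rw [PySem.List.mem_pyRange_one] at hj
    exact pvWCharA_stable cs fp start i j hj.2 (fun q hq => h j q hj.1 hj.2 hq)
  unfold pvBStep
  by_cases hb : PySem.List.pyGetD cs i '?' = '(' ∨ PySem.List.pyGetD cs i '?' = ')'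
  · cases hfi : fp.get? i with
    | none =>
      have hlast : pvWCharA cs fp start (i + 1) i = PySem.List.pyGetD cs i '?' := by
        unfold pvWCharA; simp [hb, hfi]
      rw [hsplit, hstable (fun j q _ _ hq hqi => by
            have h1 := (hg j q hq).1; rw [hqi, hfi] at h1; simp at h1)]
      simp [hb, hlast]
    | some p =>
      obtain ⟨hpi, hip, -⟩ := hg i p hfi
      by_cases hcond : start ≤ p ∧ p < i
      · -- the pair (p, i) closes: append ch and restore slot p
        simp only [if_pos hb, if_pos hcond]
        rw [hsplit]
        have hlast : pvWCharA cs fp start (i + 1) i = PySem.List.pyGetD cs i '?' := by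
          unfold pvWCharA
          simp only [hfi, if_pos hb]
          rw [if_neg (by omega : ¬ ¬ (start ≤ p ∧ p < i + 1))]
        apply List.ext_getElem
        · simp [pvWin, PySem.List.length_pyRange_one]
        · intro idx h1 h2
          have hlen : (pvWin cs fp start i).length = (i - start).toNat := by
            simp [pvWin, PySem.List.length_pyRange_one]
          have hk : (p - start).toNat < (i - start).toNat := by omega
          have hidx : idx < (i - start).toNat + 1 := by
            simpa [hlen] using h1
          by_cases hik : idx = (p - start).toNat
          · -- the restored slot
            subst hik
            rw [List.getElem_set_self]
            rw [List.getElem_append_left (by simp [PySem.List.length_pyRange_one]; omega)]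
            rw [List.getElem_map]
            have hval : (PySem.List.pyRange start i 1)[(p - start).toNat]'(by
                simp [PySem.List.length_pyRange_one]; omega) = p := by
              rw [PySem.List.getElem_pyRange_one]; omega
            rw [hval]
            -- the partner slot now shows its real character
            unfold pvWCharA
            simp only [hpi]
            by_cases hbp : PySem.List.pyGetD cs p '?' = '(' ∨ PySem.List.pyGetD cs p '?' = ')'
            · rw [if_pos hbp, if_neg (by omega : ¬ ¬ (start ≤ i ∧ i < i + 1))]
            · rw [if_neg hbp]
          · rw [List.getElem_set_ne (fun h => hik h.symm)]
            by_cases hil : idx < (i - start).toNat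
            · -- untouched slots keep their character
              rw [List.getElem_append_left (by omega : idx < (pvWin cs fp start i).length),
                  List.getElem_append_left (by simp [PySem.List.length_pyRange_one]; omega)]
              rw [List.getElem_map]
              have hval : (PySem.List.pyRange start i 1)[idx]'(by
                  simp [PySem.List.length_pyRange_one]; omega) = start + idx := by
                rw [PySem.List.getElem_pyRange_one]
              rw [hval]
              have hje : (pvWin cs fp start i)[idx]'(by omega) =
                  pvWCharA cs fp start i (start + idx) := by
                simp [pvWin, PySem.List.getElem_pyRange_one]
              rw [hje]
              refine (pvWCharA_stable cs fp start i (start + idx) (by omega)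
                (fun q hq hqi => ?_)).symm
              have hj1 := (hg _ q hq).1
              rw [hqi, hfi] at hj1
              injection hj1 with h
              omega
            · -- the appended rightmost character
              have hie : idx = (pvWin cs fp start i).length := by omega
              rw [List.getElem_append_right (by omega),
                  List.getElem_append_right (by simp [PySem.List.length_pyRange_one]; omega)]
              simp [hie, hlen, PySem.List.length_pyRange_one, hlast]
      · -- partner outside the window so far: append '.'
        have hlast : pvWCharA cs fp start (i + 1) i = '.' := by
          unfold pvWCharA
          simp only [hfi, if_pos hb]
          rw [if_pos (by omega : ¬ (start ≤ p ∧ p < i + 1))]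
        rw [hsplit, hstable (fun j q hj1 hj2 hq hqi => by
              have h1 := (hg j q hq).1
              rw [hqi, hfi] at h1
              injection h1 with h
              omega)]
        simp [hb, hcond, hlast]
  · have hnone : fp.get? i = none := by
      cases hfi : fp.get? i with
      | none => rfl
      | some p => exact absurd (hg i p hfi).2.2 hb
    have hlast : pvWCharA cs fp start (i + 1) i = PySem.List.pyGetD cs i '?' := by
      unfold pvWCharA; simp [hb]
    rw [hsplit, hstable (fun j q _ _ hq hqi => by
          have h1 := (hg j q hq).1; rw [hqi, hnone] at h1; simp at h1)]
    simp [hb, hlast]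

-- A's length loop with break, over any integer range
theorem pvALenLoop_eq (cs : List Char) (fp : PySem.Dict Int Int) (n start : Int) (a b : Int) :
    pvALenLoop cs fp n start (PySem.List.pyRange a b 1) =
      (PySem.List.pyRange a (min b (n - start + 1)) 1).map
        (fun L => (start, L, String.ofList (pvWin cs fp start (start + L)))) := by
  obtain ⟨k, hk⟩ : ∃ k, (b - a).toNat = k := ⟨_, rfl⟩
  induction k generalizing a with
  | zero =>
    rw [PySem.List.pyRange_one_eq_nil (by omega), PySem.List.pyRange_one_eq_nil (by omega)]
    rfl
  | succ k ih =>
    rw [PySem.List.pyRange_one_cons (by omega : a < b)]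
    by_cases hbreak : start + a > n
    · rw [PySem.List.pyRange_one_eq_nil (by omega : min b (n - start + 1) ≤ a)]
      simp [pvALenLoop, hbreak]
    · rw [PySem.List.pyRange_one_cons (by omega : a < min b (n - start + 1))]
      simp only [pvALenLoop, if_neg hbreak, List.map_cons, pvWin]
      rw [ih (a + 1) (by omega)]
      simp [pvWin]

-- B's while loop, run from the current window: it grows the window to the requested end
theorem pvBStep_fold (cs : List Char) (fp : PySem.Dict Int Int) (start : Int)
    (hg : pvPairGood cs fp) (k : Nat) :
    ∀ q, start ≤ q →
      (PySem.List.pyRange q (q + (k : Int)) 1).foldl (pvBStep cs fp start)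
        (pvWin cs fp start q) = pvWin cs fp start (q + (k : Int)) := by
  induction k with
  | zero =>
    intro q hq
    rw [PySem.List.pyRange_one_eq_nil (by omega)]
    simp
  | succ k ih =>
    intro q hq
    rw [show q + ((k + 1 : Nat) : Int) = (q + (k : Int)) + 1 from by push_cast; ring,
        PySem.List.pyRange_one_succ_right (by omega), List.foldl_append, ih q hq]
    simp only [List.foldl_cons, List.foldl_nil]
    exact pvBStep_win cs fp start (q + (k : Int)) hg (by omega)

theorem pvBExtend_win (cs : List Char) (fp : PySem.Dict Int Int) (start q L : Int)
    (hg : pvPairGood cs fp) (hq : start ≤ q) :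
    pvBExtend cs fp start (pvWin cs fp start q) L = pvWin cs fp start (max q (start + L)) := by
  unfold pvBExtend
  rw [pvWin_len]
  have hst : start + (((q - start).toNat : Nat) : Int) = q := by omega
  rw [hst]
  have hrng : PySem.List.pyRange q (start + L) 1 =
      PySem.List.pyRange q (q + ((start + L - q).toNat : Int)) 1 := by
    by_cases h : q < start + L
    · congr 1; omega
    · rw [PySem.List.pyRange_one_eq_nil (by omega), PySem.List.pyRange_one_eq_nil (by omega)]
  rw [hrng, pvBStep_fold cs fp start hg (start + L - q).toNat q hq]
  congr 1
  omega

-- B's fold over the requested lengths, from a buffer that is the window up to q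
theorem pvBLenFold (cs : List Char) (fp : PySem.Dict Int Int) (start : Int)
    (hg : pvPairGood cs fp) (m : Nat) :
    ∀ (a q : Int) (ws : List (Int × Int × String)), start ≤ q → q ≤ start + max a 0 →
      ((PySem.List.pyRange a (a + (m : Int)) 1).foldl
        (fun (st : List Char × List (Int × Int × String)) L =>
           let buf := pvBExtend cs fp start st.1 L
           (buf, st.2 ++ [(start, L, String.ofList buf)]))
        (pvWin cs fp start q, ws)).2 =
      ws ++ (PySem.List.pyRange a (a + (m : Int)) 1).map
        (fun L => (start, L, String.ofList (pvWin cs fp start (start + L)))) := by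
  induction m with
  | zero =>
    intro a q ws hq1 hq2
    rw [PySem.List.pyRange_one_eq_nil (by omega)]
    simp
  | succ m ih =>
    intro a q ws hq1 hq2
    rw [show a + ((m + 1 : Nat) : Int) = (a + 1) + (m : Int) from by push_cast; ring,
        PySem.List.pyRange_one_cons (by omega : a < (a + 1) + (m : Int))]
    simp only [List.foldl_cons, List.map_cons]
    rw [pvBExtend_win cs fp start q a hg hq1]
    have hmax : max q (start + a) = start + max a 0 := by omega
    rw [hmax]
    have hrec : String.ofList (pvWin cs fp start (start + max a 0)) =
        String.ofList (pvWin cs fp start (start + a)) := by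
      by_cases h0 : 0 ≤ a
      · rw [show max a 0 = a from by omega]
      · rw [pvWin_nil cs fp start _ (by omega), pvWin_nil cs fp start _ (by omega)]
    rw [hrec, ih (a + 1) (start + max a 0) (ws ++ [(start, a, String.ofList (pvWin cs fp start (start + a)))])
          (by omega) (by omega)]
    simp

-- per-start equality of the two bodies
theorem pvStart_eq (cs : List Char) (fp : PySem.Dict Int Int) (ml xl n start : Int)
    (hg : pvPairGood cs fp) (_hs : 0 ≤ start) (_hlt : start < n) :
    pvALenLoop cs fp n start (PySem.List.pyRange ml (xl + 1) 1) =
      pvBStartLoop cs fp ml xl n start := by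
  rw [pvALenLoop_eq]
  rw [show min (xl + 1) (n - start + 1) = min xl (n - start) + 1 from by omega]
  unfold pvBStartLoop
  by_cases hempty : min xl (n - start) + 1 ≤ ml
  · rw [PySem.List.pyRange_one_eq_nil hempty]
    simp
  · obtain ⟨m, hm⟩ : ∃ m : Nat, ml + (m : Int) = min xl (n - start) + 1 :=
      ⟨(min xl (n - start) + 1 - ml).toNat, by omega⟩
    rw [← hm]
    have hnil : ([] : List Char) = pvWin cs fp start start :=
      (pvWin_nil cs fp start start le_rfl).symm
    rw [hnil, pvBLenFold cs fp start hg m ml start [] le_rfl (by omega)]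
    simp

-- ===== VERDICT (by name: the statement is the Claim_ definition above) =====
theorem enumerate_consensus_windows_spec : Claim_equal_enumerate_consensus_windows := by
  intro s ml xl _ _
  unfold Spec_enumerate_consensus_windows
  unfold enumerate_consensus_windows enumerate_consensus_windows_alt
  dsimp only
  apply PySem.List.foldl_congr_mem
  intro acc start hmem
  rw [PySem.List.mem_pyRange_one] at hmem
  rw [pvStart_eq s.toList (pvFullPair s.toList) ml xl _ start (pvFullPair_good s.toList) hmem.1 hmem.2]
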